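-- pv_equiv track=rewrite | github.com/MPIBGC-TEE/bgc_md2 | prototypes/working_group_2021/mm_old_helpers.py | month_2_day_index
-- ===== SOURCE A (Python) =====
-- from functools import reduce
--
-- def month_2_day_index(ns):
--     # computes the index of the day at the end of the month n in ns
--     # this works on vectors and is faster than a recursive version working
--     # on a single index
--
--     # we first compute the sequence of day indices up to the highest month in ns
--     # and then select from this sequence the day indices for the months in ns
--     days_per_month = [31,28,31,30,31,30,31,31,30,31,30,31]
--     dpm =  (days_per_month[i%len(days_per_month)] for i in range(max(ns)))
--     # compute indices for which we want to store the results which is the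
--     # list of partial sums of the above list  (repeated)
--
--     def f(acc,el):
--         if len(acc) <1:
--             res = (el,)
--         else:
--             last = acc[-1]
--             res = acc + (el+last,)
--         return res
--     day_indices_for_continuous_moths = reduce(
--         f,
--         dpm,
--         (0,)
--     )
--     day_indices = reduce(
--         lambda acc,n: acc + [day_indices_for_continuous_moths[n]], #for n=0 we want 0
--         ns,
--         []
--     )
--     return day_indices
-- ===== SOURCE B (Python) =====
-- def month_2_day_index(ns):
--     # closed form per entry: k months = (k // 12) full 365-day years plus the
--     # cumulative days of the first k % 12 months; no running sum is kept
--     cum = [0, 31, 59, 90, 120, 151, 181, 212, 243, 273, 304, 334]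
--     m = max(max(ns), 0)
--     table = [365 * (k // 12) + cum[k % 12] for k in range(m + 1)]
--     return [table[n] for n in ns]
-- ===== Notes on version B (the rewrite author's own statement) =====
-- stated objective: faster
-- what changed: Replaces A's reduce that accumulates each prefix sum from the previous one (with quadratic tuple concatenation) and its second quadratic reduce by a closed-form formula computing every entry independently (365*(k//12) + cum[k%12] from a fixed 12-entry cumulative table) and a plain comprehension for the lookups.
import Mathlib
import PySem

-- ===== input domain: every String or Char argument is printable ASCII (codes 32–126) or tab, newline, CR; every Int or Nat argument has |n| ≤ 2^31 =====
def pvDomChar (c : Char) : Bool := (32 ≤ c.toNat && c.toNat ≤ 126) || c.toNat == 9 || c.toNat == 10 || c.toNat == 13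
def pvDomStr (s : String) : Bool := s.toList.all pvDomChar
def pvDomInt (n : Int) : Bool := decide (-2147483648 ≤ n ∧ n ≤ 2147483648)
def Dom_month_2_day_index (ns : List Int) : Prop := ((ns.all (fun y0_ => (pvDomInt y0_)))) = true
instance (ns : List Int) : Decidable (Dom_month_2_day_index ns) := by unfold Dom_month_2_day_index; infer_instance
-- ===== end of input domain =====

-- B computes every cumulative day count independently by a closed form (full 365-day years
-- plus a fixed 12-entry cumulative table) instead of A's running-sum reduces (objective: faster).

-- ===== PORT A =====
-- max(ns): raises on [] (excluded by Pre_); the getD 0 default is never used inside Pre_.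
-- days_per_month[i % 12]: i % 12 is always in range, so the pyGet? default is never used.
-- acc[-1]: acc is always nonempty (starts as (0,)), so the pyGet? default is never used.
-- day_indices_for_continuous_moths[n]: IndexError (pyGet? = none) excluded by Pre_.
def month_2_day_index (ns : List Int) : List Int :=
  let days_per_month : List Int := [31,28,31,30,31,30,31,31,30,31,30,31]
  let dpm : List Int := (PySem.List.pyRange 0 ((PySem.List.max? ns (fun x => x)).getD 0) 1).map
    (fun i => (PySem.List.pyGet? days_per_month (PySem.Int.mod i (days_per_month.length : Int))).getD 0)
  let f : List Int → Int → List Int := fun acc el =>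
    if acc.length < 1 then [el]
    else acc ++ [el + (PySem.List.pyGet? acc (-1)).getD 0]
  let day_indices_for_continuous_moths := dpm.foldl f [0]
  ns.foldl (fun acc n => acc ++ [(PySem.List.pyGet? day_indices_for_continuous_moths n).getD 0]) []

-- ===== PORT B =====
-- max(max(ns), 0): raises on [] (excluded by Pre_); cum[k % 12] is always in range and
-- table[n] (pyGet?, IndexError outside Pre_) behaves exactly as in the port of A.
def month_2_day_index_alt (ns : List Int) : List Int :=
  let cum : List Int := [0,31,59,90,120,151,181,212,243,273,304,334]
  let m : Int := max ((PySem.List.max? ns (fun x => x)).getD 0) 0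
  let table : List Int := (PySem.List.pyRange 0 (m + 1) 1).map
    (fun k => 365 * PySem.Int.floordiv k 12 + (PySem.List.pyGet? cum (PySem.Int.mod k 12)).getD 0)
  ns.map (fun n => (PySem.List.pyGet? table n).getD 0)

-- ===== PRECONDITION & SPEC =====
-- Pre_ excludes exactly the inputs where Python A raises: an empty list (ValueError from max)
-- and any month index below minus the prefix-tuple length (IndexError); A returns everywhere else.
def Pre_month_2_day_index (ns : List Int) : Prop :=
  ns ≠ [] ∧ ∀ n ∈ ns, -(max ((PySem.List.max? ns (fun x => x)).getD 0) 0 + 1) ≤ n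
instance (ns : List Int) : Decidable (Pre_month_2_day_index ns) := by
  unfold Pre_month_2_day_index; infer_instance
def pvWitness_month_2_day_index : List Int := [1, 12, 0, 24]
def Spec_month_2_day_index (ns : List Int) (out : List Int) : Prop := out = month_2_day_index_alt ns
instance (ns : List Int) (out : List Int) : Decidable (Spec_month_2_day_index ns out) := by unfold Spec_month_2_day_index; infer_instance

-- ===== CLAIM (what is proved, stated in full; the proofs are below) =====
def Claim_equal_month_2_day_index : Prop := ∀ (ns : List Int), Dom_month_2_day_index ns → Pre_month_2_day_index ns → Spec_month_2_day_index ns (month_2_day_index ns)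

-- ===== LEMMAS AND PROOFS =====

def pvDays : List Int := [31,28,31,30,31,30,31,31,30,31,30,31]
def pvCum : List Int := [0,31,59,90,120,151,181,212,243,273,304,334]
-- day count of month k and cumulative day index after k months, in B's closed form
def pvDayN (k : Nat) : Int := pvDays.getD (k % 12) 0
def pvSN (k : Nat) : Int := 365 * ((k / 12 : Nat) : Int) + pvCum.getD (k % 12) 0

-- the closed form satisfies the running-sum recurrence A's fold implements
lemma pvSN_succ (k : Nat) : pvSN (k+1) = pvSN k + pvDayN k := by
  unfold pvSN pvDayN pvDays pvCum
  have h12 : k % 12 < 12 := Nat.mod_lt _ (by norm_num)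
  interval_cases h : k % 12 <;>
  · first
    | (have e1 : (k+1) % 12 = k % 12 + 1 := by omega
       have e2 : (k+1) / 12 = k / 12 := by omega
       rw [e1, e2, h]
       simp only [List.getD_cons_succ, List.getD_cons_zero]; omega)
    | (have e1 : (k+1) % 12 = 0 := by omega
       have e2 : (k+1) / 12 = k / 12 + 1 := by omega
       rw [e1, e2]
       simp only [List.getD_cons_succ, List.getD_cons_zero]; push_cast; omega)

-- A's fold step
def pvF : List Int → Int → List Int := fun acc el =>
  if acc.length < 1 then [el] else acc ++ [el + (PySem.List.pyGet? acc (-1)).getD 0]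

-- A's fold over the first m month lengths produces exactly B's closed-form table
lemma pvTable (m : Nat) :
    ((List.range m).map pvDayN).foldl pvF [0] = (List.range (m+1)).map pvSN := by
  induction m with
  | zero => simp [pvSN, pvCum]
  | succ m ih =>
    rw [List.range_succ, List.map_append, List.foldl_append, ih]
    show pvF _ _ = _
    rw [List.range_succ (n := m + 1), List.map_append]
    unfold pvF
    rw [if_neg (by simp), PySem.List.pyGet?_neg_one]
    rw [List.range_succ, List.map_append, List.getLast?_append]
    simp [pvSN_succ, Int.add_comm]

-- A's per-month generator element
lemma pvgA (k : Nat) : (PySem.List.pyGet? pvDays (PySem.Int.mod ((k:Int)) 12)).getD 0 = pvDayN k := by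
  have h : PySem.Int.mod (k:Int) 12 = ((k % 12 : Nat) : Int) := by
    rw [PySem.Int.mod_eq_emod_of_pos (by norm_num)]; omega
  rw [h, PySem.List.pyGet?_natCast, ← List.getD_eq_getElem?_getD]
  rfl

-- B's closed-form element
lemma pvgB (k : Nat) :
    365 * PySem.Int.floordiv (k:Int) 12 + (PySem.List.pyGet? pvCum (PySem.Int.mod ((k:Int)) 12)).getD 0 = pvSN k := by
  have h : PySem.Int.mod (k:Int) 12 = ((k % 12 : Nat) : Int) := by
    rw [PySem.Int.mod_eq_emod_of_pos (by norm_num)]; omega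
  have h2 : PySem.Int.floordiv (k:Int) 12 = ((k / 12 : Nat) : Int) := by
    rw [PySem.Int.floordiv_eq_ediv_of_pos (by norm_num)]; omega
  rw [h, h2, PySem.List.pyGet?_natCast, ← List.getD_eq_getElem?_getD]
  rfl

-- the two ports agree on every input (both index the same table of length max(max(ns),0)+1)
lemma pv_main (ns : List Int) : month_2_day_index ns = month_2_day_index_alt ns := by
  unfold month_2_day_index month_2_day_index_alt
  simp only []
  set M : Int := (PySem.List.max? ns (fun x => x)).getD 0 with hM
  rw [PySem.List.foldl_append_singleton_eq_map]
  have hA : ((PySem.List.pyRange 0 M 1).map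
      (fun i => (PySem.List.pyGet? [31,28,31,30,31,30,31,31,30,31,30,31] (PySem.Int.mod i (([31,28,31,30,31,30,31,31,30,31,30,31] : List Int).length : Int))).getD 0)).foldl
      (fun acc el => if acc.length < 1 then [el] else acc ++ [el + (PySem.List.pyGet? acc (-1)).getD 0]) [0]
      = (List.range (M.toNat + 1)).map pvSN := by
    rw [PySem.List.pyRange_one, List.map_map]
    have : ∀ k ∈ List.range (M - 0).toNat,
        ((fun i => (PySem.List.pyGet? [31,28,31,30,31,30,31,31,30,31,30,31] (PySem.Int.mod i (([31,28,31,30,31,30,31,31,30,31,30,31] : List Int).length : Int))).getD 0) ∘ (fun k : Nat => (0:Int) + k)) k = pvDayN k := by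
      intro k _
      simp only [Function.comp, zero_add]
      have : (([31,28,31,30,31,30,31,31,30,31,30,31] : List Int).length : Int) = 12 := by decide
      rw [this]
      exact pvgA k
    rw [List.map_congr_left this]
    have h0 : (M - 0).toNat = M.toNat := by omega
    rw [h0]
    exact pvTable M.toNat
  rw [hA]
  have hB : ((PySem.List.pyRange 0 (max M 0 + 1) 1).map
      (fun k => 365 * PySem.Int.floordiv k 12 + (PySem.List.pyGet? [0,31,59,90,120,151,181,212,243,273,304,334] (PySem.Int.mod k 12)).getD 0))
      = (List.range (M.toNat + 1)).map pvSN := by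
    rw [PySem.List.pyRange_one, List.map_map]
    have h1 : (max M 0 + 1 - 0).toNat = M.toNat + 1 := by omega
    rw [h1]
    refine List.map_congr_left ?_
    intro k _
    simp only [Function.comp, zero_add]
    exact pvgB k
  rw [hB]
  simp

-- ===== VERDICT (by name: the statement is the Claim_ definition above) =====
theorem month_2_day_index_spec : Claim_equal_month_2_day_index := by
  intro ns _ _
  exact pv_main ns
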